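-- pv_equiv track=rewrite | github.com/rdefeo/adventofcode | 2023/day18/day18.py | gen_vertices
-- ===== SOURCE A (Python) =====
-- def gen_vertices(dirs, dists):
--     """ Returns the list of vertices and total path length. The
--     input was verified that we always form a closed loop and
--     return to the first vertex. """
--     x, y, plen = 0, 0, 0
--     vertices = []
--     for dir, dist in zip(dirs,dists):
--         plen += dist
--         if dir == 'U':
--             y -= dist
--         elif dir == 'R':
--             x += dist
--         elif dir == 'D':
--             y += dist
--         else:
--             x -= dist
--         vertices.append((x,y))
--     return vertices, plen
-- ===== SOURCE B (Python) =====
-- def _prefix_sums(nums):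
--     total = 0
--     out = []
--     for n in nums:
--         total += n
--         out.append(total)
--     return out
--
--
-- def gen_vertices(dirs, dists):
--     """ Returns the list of vertices and total path length. The
--     input was verified that we always form a closed loop and
--     return to the first vertex. """
--     moves = list(zip(dirs, dists))
--     plen = sum(d for _, d in moves)
--     DX = {'R': 1, 'U': 0, 'D': 0}
--     DY = {'U': -1, 'D': 1, 'R': 0}
--     xs = _prefix_sums([DX.get(dr, -1) * d for dr, d in moves])
--     ys = _prefix_sums([DY.get(dr, 0) * d for dr, d in moves])
--     return list(zip(xs, ys)), plen
-- ===== Notes on version B (the rewrite author's own statement) =====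
-- stated objective: alternative
-- what changed: Replaces the single stateful loop with an if/elif chain by a decomposition into independent passes: path length as one sum, per-axis deltas via direction dicts, per-axis prefix sums, then a zip of the two coordinate streams.
import Mathlib
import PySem

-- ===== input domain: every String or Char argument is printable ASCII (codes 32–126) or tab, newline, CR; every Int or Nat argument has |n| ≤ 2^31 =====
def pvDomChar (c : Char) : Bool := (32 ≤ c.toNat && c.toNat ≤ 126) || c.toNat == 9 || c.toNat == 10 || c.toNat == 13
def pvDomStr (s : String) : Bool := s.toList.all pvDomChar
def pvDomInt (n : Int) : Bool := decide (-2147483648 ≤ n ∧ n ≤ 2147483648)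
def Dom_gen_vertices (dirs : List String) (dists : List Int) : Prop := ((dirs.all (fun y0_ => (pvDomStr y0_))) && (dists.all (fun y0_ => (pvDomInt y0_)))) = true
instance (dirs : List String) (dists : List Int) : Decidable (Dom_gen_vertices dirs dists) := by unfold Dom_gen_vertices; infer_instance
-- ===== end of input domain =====

-- B recomputes the same vertices/path length by independent per-axis prefix-sum passes zipped together (alternative decomposition, same cost).

-- ===== PORT A =====
def gen_vertices (dirs : List String) (dists : List Int) : (List (Int × Int)) × Int :=
  let st := (List.zip dirs dists).foldl
    (fun (s : Int × Int × Int × List (Int × Int)) m =>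
      let x := s.1; let y := s.2.1; let plen := s.2.2.1; let vertices := s.2.2.2
      let dir := m.1; let dist := m.2
      let plen := plen + dist
      let xy : Int × Int :=
        if dir == "U" then (x, y - dist)
        else if dir == "R" then (x + dist, y)
        else if dir == "D" then (x, y + dist)
        else (x - dist, y)
      (xy.1, xy.2, plen, vertices ++ [(xy.1, xy.2)]))
    (0, 0, 0, [])
  (st.2.2.2, st.2.2.1)

-- ===== PORT B =====
def pvPrefixSums (nums : List Int) : List Int :=
  (nums.foldl (fun (s : Int × List Int) n =>
      let total := s.1 + n
      (total, s.2 ++ [total])) (0, [])).2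

def gen_vertices_alt (dirs : List String) (dists : List Int) : (List (Int × Int)) × Int :=
  let moves := List.zip dirs dists
  let plen := (moves.map (fun m => m.2)).sum
  let DX : PySem.Dict String Int := PySem.Dict.ofList [("R", 1), ("U", 0), ("D", 0)]
  let DY : PySem.Dict String Int := PySem.Dict.ofList [("U", -1), ("D", 1), ("R", 0)]
  let xs := pvPrefixSums (moves.map (fun m => PySem.Dict.getD DX m.1 (-1) * m.2))
  let ys := pvPrefixSums (moves.map (fun m => PySem.Dict.getD DY m.1 0 * m.2))
  (List.zip xs ys, plen)

-- ===== PRECONDITION & SPEC =====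
def Spec_gen_vertices (dirs : List String) (dists : List Int) (out : (List (Int × Int)) × Int) : Prop := out = gen_vertices_alt dirs dists
instance (dirs : List String) (dists : List Int) (out : (List (Int × Int)) × Int) : Decidable (Spec_gen_vertices dirs dists out) := by unfold Spec_gen_vertices; infer_instance

-- ===== CLAIM (what is proved, stated in full; the proofs are below) =====
def Claim_equal_gen_vertices : Prop := ∀ (dirs : List String) (dists : List Int), Dom_gen_vertices dirs dists → Spec_gen_vertices dirs dists (gen_vertices dirs dists)

-- ===== LEMMAS AND PROOFS =====

def pvDxv (s : String) : Int := PySem.Dict.getD (PySem.Dict.ofList [("R", 1), ("U", 0), ("D", 0)]) s (-1)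
def pvDyv (s : String) : Int := PySem.Dict.getD (PySem.Dict.ofList [("U", -1), ("D", 1), ("R", 0)]) s 0

def pvVerts (x y : Int) : List (String × Int) → List (Int × Int)
  | [] => []
  | (dr, d) :: ms => (x + pvDxv dr * d, y + pvDyv dr * d) :: pvVerts (x + pvDxv dr * d) (y + pvDyv dr * d) ms

def pvPsFrom (t : Int) : List Int → List Int
  | [] => []
  | n :: ns => (t + n) :: pvPsFrom (t + n) ns

lemma pvPs_fold (ns : List Int) : ∀ (t : Int) (out : List Int),
    ns.foldl (fun (s : Int × List Int) n =>
      let total := s.1 + n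
      (total, s.2 ++ [total])) (t, out) = (t + ns.sum, out ++ pvPsFrom t ns) := by
  induction ns with
  | nil => intro t out; simp [pvPsFrom]
  | cons n ns ih =>
      intro t out
      simp only [List.foldl_cons, pvPsFrom, List.sum_cons]
      rw [ih]
      simp; ring_nf

lemma pvPrefixSums_eq (ns : List Int) : pvPrefixSums ns = pvPsFrom 0 ns := by
  simp [pvPrefixSums, pvPs_fold]

lemma pvZip_ps (ms : List (String × Int)) : ∀ (x y : Int),
    List.zip (pvPsFrom x (ms.map (fun m => pvDxv m.1 * m.2)))
             (pvPsFrom y (ms.map (fun m => pvDyv m.1 * m.2))) = pvVerts x y ms := by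
  induction ms with
  | nil => intro x y; simp [pvPsFrom, pvVerts]
  | cons m ms ih =>
      intro x y
      obtain ⟨dr, d⟩ := m
      simp only [List.map_cons, pvPsFrom, pvVerts, List.zip_cons_cons]
      rw [ih]

lemma pvStep (dr : String) (x y d : Int) :
    (if dr == "U" then (x, y - d)
     else if dr == "R" then (x + d, y)
     else if dr == "D" then (x, y + d)
     else (x - d, y)) = ((x + pvDxv dr * d, y + pvDyv dr * d) : Int × Int) := by
  by_cases hU : dr = "U"
  · subst hU
    simp [show pvDxv "U" = (0:Int) from by decide, show pvDyv "U" = (-1:Int) from by decide]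
    ring
  · by_cases hR : dr = "R"
    · subst hR
      simp [show pvDxv "R" = (1:Int) from by decide, show pvDyv "R" = (0:Int) from by decide]
    · by_cases hD : dr = "D"
      · subst hD
        simp [show pvDxv "D" = (0:Int) from by decide, show pvDyv "D" = (1:Int) from by decide]
      · have bU : ("U" == dr) = false := by simp [Ne.symm hU]
        have bR : ("R" == dr) = false := by simp [Ne.symm hR]
        have bD : ("D" == dr) = false := by simp [Ne.symm hD]
        have hx : pvDxv dr = -1 := by
          simp [pvDxv, PySem.Dict.getD, PySem.Dict.get?, PySem.Dict.ofList, PySem.Dict.update,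
            PySem.Dict.empty, PySem.Dict.insert, PySem.Dict.contains, List.find?, bU, bR, bD]
        have hy : pvDyv dr = 0 := by
          simp [pvDyv, PySem.Dict.getD, PySem.Dict.get?, PySem.Dict.ofList, PySem.Dict.update,
            PySem.Dict.empty, PySem.Dict.insert, PySem.Dict.contains, List.find?, bU, bR, bD]
        simp [hU, hR, hD, hx, hy]
        ring

lemma pvA_fold (ms : List (String × Int)) : ∀ (x y plen : Int) (acc : List (Int × Int)),
    ms.foldl
      (fun (s : Int × Int × Int × List (Int × Int)) m =>
        let x := s.1; let y := s.2.1; let plen := s.2.2.1; let vertices := s.2.2.2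
        let dir := m.1; let dist := m.2
        let plen := plen + dist
        let xy : Int × Int :=
          if dir == "U" then (x, y - dist)
          else if dir == "R" then (x + dist, y)
          else if dir == "D" then (x, y + dist)
          else (x - dist, y)
        (xy.1, xy.2, plen, vertices ++ [(xy.1, xy.2)]))
      (x, y, plen, acc) =
    (x + (ms.map (fun m => pvDxv m.1 * m.2)).sum,
     y + (ms.map (fun m => pvDyv m.1 * m.2)).sum,
     plen + (ms.map (fun m => m.2)).sum,
     acc ++ pvVerts x y ms) := by
  induction ms with
  | nil => intro x y plen acc; simp [pvVerts]
  | cons m ms ih =>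
      intro x y plen acc
      obtain ⟨dr, d⟩ := m
      simp only [List.foldl_cons, List.map_cons, List.sum_cons, pvVerts]
      rw [pvStep]
      rw [ih]
      simp
      constructor
      · ring
      constructor
      · ring
      · ring

-- ===== VERDICT (by name: the statement is the Claim_ definition above) =====
theorem gen_vertices_spec : Claim_equal_gen_vertices := by
  intro dirs dists _
  show _ = _
  unfold gen_vertices gen_vertices_alt
  rw [pvA_fold]
  simp only [pvPrefixSums_eq]
  have hx : (fun (m : String × Int) =>
      PySem.Dict.getD (PySem.Dict.ofList [("R", 1), ("U", 0), ("D", 0)]) m.1 (-1) * m.2)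
      = (fun (m : String × Int) => pvDxv m.1 * m.2) := rfl
  have hy : (fun (m : String × Int) =>
      PySem.Dict.getD (PySem.Dict.ofList [("U", -1), ("D", 1), ("R", 0)]) m.1 0 * m.2)
      = (fun (m : String × Int) => pvDyv m.1 * m.2) := rfl
  simp only [hx, hy, pvZip_ps]
  simp
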